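-- pv_equiv track=rewrite | github.com/cj-torres/complex_hierarchy | language_builder2.py | make_double_abplus_continuation
-- ===== SOURCE A (Python) =====
-- def make_double_abplus_continuation(w):
--     cont = []
--     for i, c in enumerate(w):
--         if i % 2 == 0:
--             if w[1:i//2+1] == w[i//2+1:i+1]:
--                 cont.append([1, 1, 1])
--             else:
--                 cont.append([0, 1, 1])
--         else:
--             cont.append([0, 1, 1])
--     return cont
-- ===== SOURCE B (Python) =====
-- def make_double_abplus_continuation(w):
--     # O(n): Z-array of s = w[1:]; position i=2k is flagged iff z[k] >= k
--     # (i.e. s[:k] == s[k:2k], which is A's slice comparison).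
--     s = w[1:]
--     m = len(s)
--     z = [0] * m
--     l = r = 0
--     for j in range(1, m):
--         t = min(r - j, z[j - l]) if j < r else 0
--         while j + t < m and s[t] == s[j + t]:
--             t += 1
--         z[j] = t
--         if j + t > r:
--             l, r = j, j + t
--     cont = []
--     for i in range(len(w)):
--         if i % 2 == 0:
--             k = i // 2
--             cont.append([1, 1, 1] if k == 0 or z[k] >= k else [0, 1, 1])
--         else:
--             cont.append([0, 1, 1])
--     return cont
-- ===== Notes on version B (the rewrite author's own statement) =====
-- stated objective: faster
-- what changed: A compares two fresh slices of w at every even index (quadratic); B builds the Z-array of s = w[1:] once in linear time and flags even position i=2k iff z[k] >= k.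
import Mathlib
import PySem

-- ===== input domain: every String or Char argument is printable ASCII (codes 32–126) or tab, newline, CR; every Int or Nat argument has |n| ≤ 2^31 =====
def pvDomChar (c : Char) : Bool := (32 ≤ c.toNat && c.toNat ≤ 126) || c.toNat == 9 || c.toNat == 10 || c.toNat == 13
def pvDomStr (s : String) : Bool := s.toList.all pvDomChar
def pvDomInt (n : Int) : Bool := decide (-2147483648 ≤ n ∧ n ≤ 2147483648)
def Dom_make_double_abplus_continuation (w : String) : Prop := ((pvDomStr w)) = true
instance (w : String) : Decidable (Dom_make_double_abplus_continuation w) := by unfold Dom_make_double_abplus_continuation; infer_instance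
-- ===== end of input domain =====

-- B replaces A's per-even-index quadratic slice comparison by a single O(n) Z-array of w[1:]
-- (objective: faster, asymptotic).

-- ===== PORT A =====
-- strings are handled as their code-point lists (w.toList); slices via PySem.List.slice (exact)
def make_double_abplus_continuation (w : String) : List (List Int) :=
  (PySem.List.enumerate w.toList 0).foldl (fun cont ic =>
    if PySem.Int.mod ic.1 2 = 0 then
      if PySem.List.slice w.toList (some 1) (some (PySem.Int.floordiv ic.1 2 + 1)) =
         PySem.List.slice w.toList (some (PySem.Int.floordiv ic.1 2 + 1)) (some (ic.1 + 1)) then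
        cont ++ [[1, 1, 1]]
      else
        cont ++ [[0, 1, 1]]
    else
      cont ++ [[0, 1, 1]]) []

-- ===== PORT B =====
-- the `while j + t < m and s[t] == s[j + t]: t += 1` loop of Source B
def zextend (s : List Char) (j t : Nat) : Nat :=
  if j + t < s.length then
    if s.getD t 'a' = s.getD (j + t) 'a' then zextend s j (t + 1) else t
  else t
termination_by s.length - (j + t)
decreasing_by omega

-- one iteration of Source B's Z-array loop; state = (z, l, r)
def zstep (s : List Char) (st : List Nat × Nat × Nat) (j : Nat) : List Nat × Nat × Nat :=
  let t0 := if j < st.2.2 then min (st.2.2 - j) (st.1.getD (j - st.2.1) 0) else 0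
  let t := zextend s j t0
  let z' := st.1.set j t
  if st.2.2 < j + t then (z', j, j + t) else (z', st.2.1, st.2.2)

def make_double_abplus_continuation_alt (w : String) : List (List Int) :=
  let s := PySem.List.slice w.toList (some 1) none   -- s = w[1:]
  let m := s.length
  let zlr := (List.range' 1 (m - 1)).foldl (zstep s) (List.replicate m 0, 0, 0)
  (List.range w.toList.length).foldl (fun cont i =>
    if i % 2 = 0 then
      if i / 2 = 0 ∨ i / 2 ≤ zlr.1.getD (i / 2) 0 then
        cont ++ [[1, 1, 1]]
      else
        cont ++ [[0, 1, 1]]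
    else
      cont ++ [[0, 1, 1]]) []

-- ===== PRECONDITION & SPEC =====
def Spec_make_double_abplus_continuation (w : String) (out : List (List Int)) : Prop := out = make_double_abplus_continuation_alt w
instance (w : String) (out : List (List Int)) : Decidable (Spec_make_double_abplus_continuation w out) := by unfold Spec_make_double_abplus_continuation; infer_instance

-- ===== CLAIM (what is proved, stated in full; the proofs are below) =====
def Claim_equal_make_double_abplus_continuation : Prop := ∀ (w : String), Dom_make_double_abplus_continuation w → Spec_make_double_abplus_continuation w (make_double_abplus_continuation w)

-- ===== LEMMAS AND PROOFS =====

-- length of the longest common prefix of two lists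
def lcp : List Char → List Char → Nat
  | x :: a, y :: b => if x = y then lcp a b + 1 else 0
  | _, _ => 0

theorem lcp_le_left : ∀ (a b : List Char), lcp a b ≤ a.length := by
  intro a
  induction a with
  | nil => intro b; cases b <;> simp [lcp]
  | cons x a ih =>
    intro b
    cases b with
    | nil => simp [lcp]
    | cons y b =>
      simp only [lcp, List.length_cons]
      split
      · have := ih b; omega
      · omega

theorem lcp_le_right : ∀ (a b : List Char), lcp a b ≤ b.length := by
  intro a
  induction a with
  | nil => intro b; cases b <;> simp [lcp]
  | cons x a ih =>
    intro b
    cases b with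
    | nil => simp [lcp]
    | cons y b =>
      simp only [lcp, List.length_cons]
      split
      · have := ih b; omega
      · omega

theorem lcp_take : ∀ (k : Nat) (a b : List Char), k ≤ a.length →
    (a.take k = b.take k ↔ k ≤ lcp a b) := by
  intro k
  induction k with
  | zero => intro a b _; simp
  | succ k ih =>
    intro a b hk
    cases a with
    | nil => simp at hk
    | cons x a =>
      cases b with
      | nil =>
        simp only [List.take_nil, lcp]
        constructor
        · intro h; simp at h
        · intro h; cases a <;> omega
      | cons y b =>
        simp only [List.take_succ_cons, lcp]
        by_cases hxy : x = y
        · subst hxy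
          rw [if_pos rfl]
          simp only [List.cons.injEq, true_and]
          rw [ih a b (by simpa using hk)]
          omega
        · rw [if_neg hxy]
          simp only [List.cons.injEq]
          constructor
          · rintro ⟨h, -⟩; exact absurd h hxy
          · omega

theorem lcp_getElem? {a b : List Char} {u : Nat} (h : u < lcp a b) : a[u]? = b[u]? := by
  have h1 : u + 1 ≤ a.length := by have := lcp_le_left a b; omega
  have := (lcp_take (u + 1) a b h1).mpr (by omega)
  calc a[u]? = (a.take (u + 1))[u]? := by rw [List.getElem?_take_of_lt (by omega)]
    _ = (b.take (u + 1))[u]? := by rw [this]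
    _ = b[u]? := by rw [List.getElem?_take_of_lt (by omega)]

theorem lcp_mismatch {a b : List Char} (h1 : lcp a b < a.length) (_h2 : lcp a b < b.length) :
    a[lcp a b]? ≠ b[lcp a b]? := by
  intro heq
  have htk : a.take (lcp a b) = b.take (lcp a b) :=
    (lcp_take (lcp a b) a b (by omega)).mpr le_rfl
  have : a.take (lcp a b + 1) = b.take (lcp a b + 1) := by
    rw [List.take_add_one, List.take_add_one, htk, heq]
  have := (lcp_take (lcp a b + 1) a b (by omega)).mp this
  omega

theorem zextend_spec (s : List Char) (j : Nat) (hj : 1 ≤ j) :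
    ∀ (d t : Nat), lcp s (s.drop j) - t = d → t ≤ lcp s (s.drop j) →
    zextend s j t = lcp s (s.drop j) := by
  have hLle : lcp s (s.drop j) ≤ s.length - j := by
    have := lcp_le_right s (s.drop j); simpa using this
  intro d
  induction d with
  | zero =>
    intro t hd ht
    have htL : t = lcp s (s.drop j) := by omega
    rw [zextend]
    by_cases hlt : j + t < s.length
    · rw [if_pos hlt, if_neg]
      · exact htL
      · intro hchar
        have h1 : t < s.length := by omega
        have h2 : t < (s.drop j).length := by simp [List.length_drop]; omega
        have heq : s[t]? = (s.drop j)[t]? := by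
          rw [List.getElem?_eq_getElem h1, List.getElem?_eq_getElem h2]
          have e3 : (s.drop j)[t]'h2 = s[j + t] := List.getElem_drop
          rw [e3, ← List.getD_eq_getElem s 'a' h1, ← List.getD_eq_getElem s 'a' hlt]
          exact congrArg some hchar
        exact lcp_mismatch (htL ▸ h1) (htL ▸ h2) (htL ▸ heq)
    · rw [if_neg hlt]; exact htL
  | succ d ih =>
    intro t hd ht
    have htlt : t < lcp s (s.drop j) := by omega
    have hlt : j + t < s.length := by omega
    have h2 : t < (s.drop j).length := by simp [List.length_drop]; omega
    have hchar : s.getD t 'a' = s.getD (j + t) 'a' := by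
      have := lcp_getElem? (a := s) (b := s.drop j) htlt
      rw [List.getElem?_eq_getElem (by omega : t < s.length),
          List.getElem?_eq_getElem h2] at this
      have e3 : (s.drop j)[t]'h2 = s[j + t] := List.getElem_drop
      rw [List.getD_eq_getElem s 'a' (by omega : t < s.length),
          List.getD_eq_getElem s 'a' hlt, ← e3]
      exact Option.some.inj this
    rw [zextend, if_pos hlt, if_pos hchar]
    exact ih (t + 1) (by omega) (by omega)

-- loop invariant for Source B's Z-array loop
def ZInv (s : List Char) (j : Nat) (st : List Nat × Nat × Nat) : Prop :=
  st.1.length = s.length ∧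
  (∀ u, 1 ≤ u → u < j → st.1.getD u 0 = lcp s (s.drop u)) ∧
  (∀ u, u < st.1.length → (u = 0 ∨ j ≤ u) → st.1.getD u 0 = 0) ∧
  ((st.2.1 = 0 ∧ st.2.2 = 0) ∨
   (1 ≤ st.2.1 ∧ st.2.1 < j ∧ st.2.2 = st.2.1 + lcp s (s.drop st.2.1)))

theorem zstep_inv {s : List Char} {j : Nat} {st : List Nat × Nat × Nat}
    (hj : 1 ≤ j) (hjm : j < s.length) (h : ZInv s j st) : ZInv s (j + 1) (zstep s st j) := by
  obtain ⟨z, l, r⟩ := st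
  obtain ⟨hlen, hz, hz0, hbox⟩ := h
  dsimp only at hlen hz hz0 hbox
  have hLle : lcp s (s.drop j) ≤ s.length - j := by
    have := lcp_le_right s (s.drop j); simpa using this
  -- the starting value of the while loop is a sound lower bound on the lcp
  have ht0 : (if j < r then min (r - j) (z.getD (j - l) 0) else 0) ≤ lcp s (s.drop j) := by
    split
    case isTrue hjr =>
      rcases hbox with ⟨hl0, hr0⟩ | ⟨hl1, hlj, hr⟩
      · omega
      · have hd1 : 1 ≤ j - l := by omega
        have hdj : j - l < j := by omega
        have hzd : z.getD (j - l) 0 = lcp s (s.drop (j - l)) := hz _ hd1 hdj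
        have hZl_le : lcp s (s.drop l) ≤ s.length - l := by
          have := lcp_le_right s (s.drop l); simpa using this
        set cand := min (r - j) (z.getD (j - l) 0) with hcand
        have hcl : cand ≤ s.length - j := by omega
        have htake : s.take cand = (s.drop j).take cand := by
          apply List.ext_getElem
          · simp only [List.length_take, List.length_drop]; omega
          · intro u hu1 hu2
            have hu : u < cand := by simp only [List.length_take] at hu1; omega
            have hujs : u < s.length := by omega
            have hjus : j + u < s.length := by omega
            have e1 : s[u]? = s[(j - l) + u]? := by
              have h1 := lcp_getElem? (a := s) (b := s.drop (j - l)) (u := u) (by omega)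
              rw [List.getElem?_drop] at h1
              exact h1
            have e2 : s[(j - l) + u]? = s[j + u]? := by
              have h1 := lcp_getElem? (a := s) (b := s.drop l) (u := (j - l) + u) (by omega)
              rw [List.getElem?_drop] at h1
              rw [h1]
              congr 1
              omega
            have e3 : s[u]? = s[j + u]? := e1.trans e2
            rw [List.getElem?_eq_getElem hujs, List.getElem?_eq_getElem hjus] at e3
            simp only [List.getElem_take, List.getElem_drop]
            exact Option.some.inj e3
        have := (lcp_take cand s (s.drop j) (by omega)).mp htake
        omega
    case isFalse => omega
  have hzx := zextend_spec s j hj (lcp s (s.drop j) - _) _ rfl ht0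
  unfold zstep
  dsimp only
  rw [hzx]
  set L := lcp s (s.drop j) with hL
  have hset : ∀ u, (z.set j L).getD u 0 = if u = j then L else z.getD u 0 := by
    intro u
    rw [List.getD_eq_getElem?_getD, List.getElem?_set, List.getD_eq_getElem?_getD]
    by_cases huj : u = j
    · simp [huj, hlen, hjm]
    · rw [if_neg (Ne.symm huj), if_neg huj]
  refine ⟨?_, ?_, ?_, ?_⟩
  · split <;> simpa using hlen
  · intro u hu1 hu2
    have hval : (z.set j L).getD u 0 = lcp s (s.drop u) := by
      rw [hset]
      by_cases huj : u = j
      · rw [if_pos huj, huj, hL]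
      · rw [if_neg huj]; exact hz u hu1 (by omega)
    split <;> simpa using hval
  · intro u hu hcases
    have hu' : u < z.length := by
      revert hu; split <;> (dsimp only; simp [hlen])
    have hval : (z.set j L).getD u 0 = 0 := by
      rw [hset, if_neg (by omega)]
      exact hz0 u hu' (by omega)
    split <;> simpa using hval
  · split
    case isTrue hlt =>
      refine Or.inr ⟨hj, by dsimp only; omega, ?_⟩
      dsimp only
    case isFalse hlt =>
      rcases hbox with ⟨hl0, hr0⟩ | ⟨hl1, hlj, hr⟩
      · exact Or.inl ⟨hl0, hr0⟩
      · exact Or.inr ⟨hl1, by dsimp only; omega, hr⟩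

theorem zfold_inv (s : List Char) :
    ∀ (cnt j : Nat) (st : List Nat × Nat × Nat), 1 ≤ j → j + cnt ≤ s.length → ZInv s j st →
    ZInv s (j + cnt) ((List.range' j cnt).foldl (zstep s) st) := by
  intro cnt
  induction cnt with
  | zero => intro j st _ _ h; simpa using h
  | succ c ih =>
    intro j st hj hcnt h
    rw [List.range'_succ, List.foldl_cons]
    have := ih (j + 1) (zstep s st j) (by omega) (by omega) (zstep_inv hj (by omega) h)
    simpa [Nat.add_assoc, Nat.add_comm 1 c] using this

theorem zfinal_spec (s : List Char) (k : Nat) (hk1 : 1 ≤ k) (hkm : k < s.length) :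
    ((List.range' 1 (s.length - 1)).foldl (zstep s) (List.replicate s.length 0, 0, 0)).1.getD k 0
      = lcp s (s.drop k) := by
  have hinit : ZInv s 1 (List.replicate s.length 0, 0, 0) := by
    refine ⟨by simp, by omega, by intro u _ _; simp, Or.inl ⟨rfl, rfl⟩⟩
  have := zfold_inv s (s.length - 1) 1 _ le_rfl (by omega) hinit
  exact this.2.1 k hk1 (by omega)

-- generic shape of both output loops: append one of three rows per element
theorem foldl_if3 {α : Type} (p q : α → Prop) [DecidablePred p] [DecidablePred q]
    (u v : List Int) :
    ∀ (xs : List α) (acc : List (List Int)),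
      xs.foldl (fun c x => if p x then (if q x then c ++ [u] else c ++ [v]) else c ++ [v]) acc
        = acc ++ xs.map (fun x => if p x ∧ q x then u else v) := by
  intro xs
  induction xs with
  | nil => simp
  | cons x xs ih =>
    intro acc
    simp only [List.foldl_cons, List.map_cons]
    by_cases hp : p x
    · by_cases hq : q x
      · simp [hp, hq, ih]
      · simp [hp, hq, ih]
    · simp [hp, ih]

-- the two flag conditions agree at every even index
theorem cond_iff (cs : List Char) (i : Nat) (hi : i < cs.length) (heven : i % 2 = 0) :
    (PySem.List.slice cs (some 1) (some (PySem.Int.floordiv (i : Int) 2 + 1)) =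
       PySem.List.slice cs (some (PySem.Int.floordiv (i : Int) 2 + 1)) (some ((i : Int) + 1)))
    ↔ (i / 2 = 0 ∨ i / 2 ≤
        ((List.range' 1 ((cs.drop 1).length - 1)).foldl (zstep (cs.drop 1))
          (List.replicate (cs.drop 1).length 0, 0, 0)).1.getD (i / 2) 0) := by
  have hfd : PySem.Int.floordiv (i : Int) 2 = ((i / 2 : Nat) : Int) := by
    exact_mod_cast PySem.Int.floordiv_natCast i 2
  have hc1 : PySem.Int.floordiv (i : Int) 2 + 1 = (((i / 2 + 1 : Nat)) : Int) := by
    rw [hfd]; push_cast; ring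
  have hc2 : ((i : Int) + 1) = (((i + 1 : Nat)) : Int) := by push_cast; ring
  have hone : (some (1 : Int)) = (some (((1 : Nat)) : Int)) := by norm_num
  rw [hc1, hc2, hone, PySem.List.slice_natCast, PySem.List.slice_natCast]
  have h1 : i / 2 + 1 - 1 = i / 2 := by omega
  have h2 : i + 1 - (i / 2 + 1) = i / 2 := by omega
  have h3 : cs.drop (i / 2 + 1) = (cs.drop 1).drop (i / 2) := by
    rw [List.drop_drop]; congr 1; omega
  rw [h1, h2, h3]
  set s := cs.drop 1 with hs
  have hslen : s.length = cs.length - 1 := by simp [hs]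
  by_cases hq0 : i / 2 = 0
  · simp [hq0]
  · have hq1 : 1 ≤ i / 2 := by omega
    have hqm : i / 2 < s.length := by omega
    rw [zfinal_spec s (i / 2) hq1 hqm]
    rw [lcp_take (i / 2) s (s.drop (i / 2)) (by omega)]
    constructor
    · intro h; exact Or.inr h
    · rintro (h | h)
      · omega
      · exact h

theorem ports_eq (w : String) :
    make_double_abplus_continuation w = make_double_abplus_continuation_alt w := by
  unfold make_double_abplus_continuation make_double_abplus_continuation_alt
  dsimp only
  rw [foldl_if3 (p := fun ic : Int × Char => PySem.Int.mod ic.1 2 = 0)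
        (q := fun ic : Int × Char =>
          PySem.List.slice w.toList (some 1) (some (PySem.Int.floordiv ic.1 2 + 1)) =
          PySem.List.slice w.toList (some (PySem.Int.floordiv ic.1 2 + 1)) (some (ic.1 + 1)))
        [1, 1, 1] [0, 1, 1]]
  rw [foldl_if3 (p := fun i : Nat => i % 2 = 0)
        (q := fun i : Nat => i / 2 = 0 ∨ i / 2 ≤
          ((List.range' 1 ((PySem.List.slice w.toList (some 1) none).length - 1)).foldl
            (zstep (PySem.List.slice w.toList (some 1) none))
            (List.replicate (PySem.List.slice w.toList (some 1) none).length 0, 0, 0)).1.getD (i / 2) 0)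
        [1, 1, 1] [0, 1, 1]]
  simp only [List.nil_append]
  rw [PySem.List.enumerate_eq_map_pyRange w.toList 'a']
  rw [List.map_map]
  have hlen : PySem.List.len w.toList = ((w.toList.length : Nat) : Int) := by
    simp [PySem.List.len]
  rw [hlen, PySem.List.pyRange_zero_natCast, List.map_map]
  apply List.map_congr_left
  intro i hi
  have hin : i < w.toList.length := List.mem_range.mp hi
  simp only [Function.comp]
  have hsl : PySem.List.slice w.toList (some 1) none = w.toList.drop 1 := by
    have := PySem.List.slice_from_natCast w.toList 1
    simpa using this
  rw [hsl]
  apply if_congr ?_ rfl rfl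
  have hmod : (PySem.Int.mod ((i : Nat) : Int) 2 = 0) ↔ (i % 2 = 0) := by
    have h2c : (((2 : Nat)) : Int) = 2 := by norm_num
    have h := PySem.Int.mod_natCast i 2
    rw [h2c] at h
    rw [h]
    exact Nat.cast_eq_zero
  rw [hmod]
  exact and_congr_right (fun heven => cond_iff w.toList i hin heven)

theorem make_double_abplus_continuation_spec : Claim_equal_make_double_abplus_continuation := by
  intro w _
  unfold Spec_make_double_abplus_continuation
  exact ports_eq w
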